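-- pv_equiv track=rewrite | github.com/Yawn-Sean/Daily_CF_Problems | daily_problems/2025/11/1126/personal_submission/cf106197l_liryc.py | solve
-- ===== SOURCE A (Python) =====
-- def solve(n: int) -> list[str]:
--     g = [[0] * n for _ in range(n)]
--     g[-1][0] = 1
--     for j in range(1, n):
--         g[-1][j] = 3
--     for i in range(1, n - 1):
--         for j in range(-i, 0):
--             g[i][j] = 2
--     return [''.join(str(x + 1) for x in a) for a in g]
-- ===== SOURCE B (Python) =====
-- def solve(n: int) -> list[str]:
--     rows = ['1' * (n - i) + '3' * i for i in range(n - 1)]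
--     rows.append('2' + '4' * (n - 1))
--     return rows
-- ===== Notes on version B (the rewrite author's own statement) =====
-- stated objective: faster
-- what changed: B builds each output row string directly by a closed-form character-repetition formula ('1'*(n-i)+'3'*i, last row '2'+'4'*(n-1)) instead of allocating an n*n integer matrix, mutating it cell by cell with three index loops (one using negative indices) and then stringifying every cell.
import Mathlib
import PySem

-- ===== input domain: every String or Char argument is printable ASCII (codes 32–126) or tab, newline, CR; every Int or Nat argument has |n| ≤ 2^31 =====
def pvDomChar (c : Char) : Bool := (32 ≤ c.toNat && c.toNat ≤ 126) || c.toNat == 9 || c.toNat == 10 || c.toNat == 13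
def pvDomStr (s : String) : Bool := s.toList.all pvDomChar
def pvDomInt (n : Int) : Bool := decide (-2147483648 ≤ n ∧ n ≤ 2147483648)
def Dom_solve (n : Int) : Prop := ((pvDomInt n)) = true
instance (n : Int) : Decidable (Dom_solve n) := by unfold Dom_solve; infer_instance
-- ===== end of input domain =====

-- B builds each output row string by a closed-form character-repetition formula instead of
-- allocating and mutating an n×n integer matrix cell by cell (measured faster in a timing run).

-- ===== PORT A =====
def solve (n : Int) : List String :=
  let g := (PySem.List.pyRange 0 n 1).map (fun _ => (PySem.List.pyRange 0 n 1).map (fun _ => (0 : Int)))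
  let g := PySem.List.pySetD g (-1) (PySem.List.pySetD (PySem.List.pyGetD g (-1) []) 0 1)
  let g := (PySem.List.pyRange 1 n 1).foldl
      (fun g j => PySem.List.pySetD g (-1) (PySem.List.pySetD (PySem.List.pyGetD g (-1) []) j 3)) g
  let g := (PySem.List.pyRange 1 (n - 1) 1).foldl
      (fun g i => (PySem.List.pyRange (-i) 0 1).foldl
        (fun g j => PySem.List.pySetD g i (PySem.List.pySetD (PySem.List.pyGetD g i []) j 2)) g) g
  g.map (fun a => PySem.Str.join "" (a.map (fun x => PySem.Int.toStr (x + 1))))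

-- ===== PORT B =====
-- Python's  s * k  (string repetition): k concatenated copies of s's characters; k ≤ 0 gives "" — exact.
def pyStrMulChars (cs : List Char) (k : Int) : List Char := (List.replicate k.toNat cs).flatten

def solve_alt (n : Int) : List String :=
  let rows := (PySem.List.pyRange 0 (n - 1) 1).map
      (fun i => String.ofList (pyStrMulChars ['1'] (n - i) ++ pyStrMulChars ['3'] i))
  rows ++ [String.ofList ('2' :: pyStrMulChars ['4'] (n - 1))]

-- ===== PRECONDITION & SPEC =====
-- A raises IndexError (g[-1] on an empty grid) for n ≤ 0; it returns normally exactly on n ≥ 1.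
def Pre_solve (n : Int) : Prop := 1 ≤ n
instance (n : Int) : Decidable (Pre_solve n) := by unfold Pre_solve; infer_instance
def pvWitness_solve : Int := (3)
def Spec_solve (n : Int) (out : List String) : Prop := out = solve_alt n
instance (n : Int) (out : List String) : Decidable (Spec_solve n out) := by unfold Spec_solve; infer_instance

-- ===== CLAIM (what is proved, stated in full; the proofs are below) =====
def Claim_equal_solve : Prop := ∀ (n : Int), Dom_solve n → Pre_solve n → Spec_solve n (solve n)

-- ===== LEMMAS AND PROOFS =====

-- setting the last element: xs[-1] = v on a list presented as init ++ [x]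
theorem pySetD_last {α : Type} (xs : List α) (x v : α) :
    PySem.List.pySetD (xs ++ [x]) (-1) v = xs ++ [v] := by
  simp [PySem.List.pySetD, PySem.List.pySet?, PySem.List.pyIdx?]

-- setting at a negative index: xs[-k] = v is set at length - k
theorem pySetD_negNat {α : Type} (xs : List α) (v : α) (k : Nat) (h1 : 0 < k) (h2 : k ≤ xs.length) :
    PySem.List.pySetD xs (-(k : Int)) v = xs.set (xs.length - k) v := by
  simp [PySem.List.pySetD, PySem.List.pySet?, PySem.List.pyIdx?]
  rw [if_neg (by omega), if_pos h2]
  simp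

theorem pyRange_zero_eq_map_range (n : Int) :
    PySem.List.pyRange 0 n 1 = (List.range n.toNat).map (fun (k : Nat) => (k : Int)) := by
  rw [PySem.List.pyRange_one]
  simp

-- a loop that reads and rewrites only the LAST row
theorem lastrow_loop {α : Type} (l : List Int) (F : α → Int → α) (d : α) :
    ∀ (xs : List α) (x : α),
      l.foldl (fun g j => PySem.List.pySetD g (-1) (F (PySem.List.pyGetD g (-1) d) j)) (xs ++ [x])
        = xs ++ [l.foldl F x] := by
  induction l with
  | nil => intro xs x; rfl
  | cons j t ih =>
      intro xs x
      simp only [List.foldl_cons, PySem.List.pyGetD_neg_one_append_singleton, pySetD_last]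
      exact ih xs (F x j)

-- a loop that reads and rewrites only row i (i ≥ 0, in range)
-- a loop that reads and rewrites only row i (i ≥ 0, in range)
theorem row_loop {α : Type} (l : List Int) (i : Int) (hi : 0 ≤ i) (F : α → Int → α) (d : α) :
    ∀ (g : List α), i.toNat < g.length →
      l.foldl (fun g j => PySem.List.pySetD g i (F (PySem.List.pyGetD g i d) j)) g
        = g.set i.toNat (l.foldl F (g.getD i.toNat d)) := by
  induction l with
  | nil =>
      intro g hg
      simp only [List.foldl_nil, List.getD_eq_getElem _ _ hg]
      exact (List.set_getElem_self hg).symm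
  | cons j t ih =>
      intro g hg
      have hset : PySem.List.pySetD g i (F (PySem.List.pyGetD g i d) j)
          = g.set i.toNat (F (g.getD i.toNat d) j) := by
        rw [PySem.List.pySetD_of_nonneg _ _ hi,
            PySem.List.pyGetD_eq_getElem _ _ hi (by omega),
            List.getD_eq_getElem _ _ hg]
      simp only [List.foldl_cons, hset]
      rw [ih _ (by simpa using hg)]
      simp [hg, List.getElem_set_self]

theorem take_succ_set {α : Type} (xs : List α) (p : Nat) (v : α) (hp : p < xs.length) :
    (xs.set p v).take (p + 1) = xs.take p ++ [v] := by
  rw [List.set_eq_take_append_cons_drop, if_pos hp, List.take_append]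
  simp [List.length_take, Nat.min_eq_left (le_of_lt hp)]

-- filling xs[a..a+k) with the constant v
theorem fill_pos {α : Type} (v : α) :
    ∀ (k : Nat) (a : Int), 0 ≤ a → ∀ (xs : List α), a.toNat + k ≤ xs.length →
      (PySem.List.pyRange a (a + k) 1).foldl (fun r j => PySem.List.pySetD r j v) xs
        = xs.take a.toNat ++ List.replicate k v ++ xs.drop (a.toNat + k) := by
  intro k
  induction k with
  | zero =>
      intro a ha xs hlen
      rw [show a + ((0:Nat):Int) = a by simp, PySem.List.pyRange_one_eq_nil le_rfl]
      simp
  | succ k ih =>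
      intro a ha xs hlen
      rw [PySem.List.pyRange_one_cons (by omega : a < a + ((k+1:Nat):Int))]
      simp only [List.foldl_cons]
      rw [PySem.List.pySetD_of_nonneg _ _ ha]
      rw [show a + ((k+1:Nat):Int) = (a + 1) + ((k:Nat):Int) by push_cast; ring]
      rw [ih (a+1) (by omega) _ (by simp; omega)]
      rw [show (a+1).toNat = a.toNat + 1 by omega]
      rw [take_succ_set _ _ _ (by omega), List.drop_set_of_lt (by omega)]
      simp [List.replicate_succ]
      omega

-- filling the last i cells: xs[-i..0) with the constant v
theorem fill_neg {α : Type} (v : α) :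
    ∀ (i : Nat) (xs : List α), i ≤ xs.length →
      (PySem.List.pyRange (-(i : Int)) 0 1).foldl (fun r j => PySem.List.pySetD r j v) xs
        = xs.take (xs.length - i) ++ List.replicate i v := by
  intro i
  induction i with
  | zero =>
      intro xs hlen
      rw [show (-((0:Nat):Int)) = 0 by simp, PySem.List.pyRange_one_eq_nil le_rfl]
      simp
  | succ i ih =>
      intro xs hlen
      rw [PySem.List.pyRange_one_cons (by omega : -((i+1:Nat):Int) < 0)]
      simp only [List.foldl_cons]
      rw [pySetD_negNat _ v (i+1) (by omega) hlen]
      rw [show (-((i+1:Nat):Int) + 1) = -((i:Nat):Int) by push_cast; ring]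
      rw [ih _ (by simp; omega)]
      rw [List.length_set]
      have h1 : xs.length - i = (xs.length - (i+1)) + 1 := by omega
      rw [h1, take_succ_set _ _ _ (by omega)]
      simp [List.replicate_succ]

theorem set_append_length {α : Type} (l1 l2 : List α) (v : α) :
    (l1 ++ l2).set l1.length v = l1 ++ l2.set 0 v := by
  rw [List.set_append]; simp

theorem getD_append_length {α : Type} (l1 l2 : List α) (d : α) :
    (l1 ++ l2).getD l1.length d = l2.getD 0 d := by
  simp [List.getD, List.getElem?_append_right]

-- the middle loop: rows a..a+k-1 each get their last-row-index cells set to 2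
theorem outer_loop (m : Nat) :
    ∀ (k a : Nat), a + k + 1 ≤ m →
    ∀ (pref : List (List Int)) (last : List Int), pref.length = a →
      (PySem.List.pyRange (a : Int) ((a : Int) + (k : Nat)) 1).foldl
        (fun g i => (PySem.List.pyRange (-i) 0 1).foldl
           (fun g j => PySem.List.pySetD g i (PySem.List.pySetD (PySem.List.pyGetD g i []) j 2)) g)
        (pref ++ List.replicate (m - 1 - a) (List.replicate m (0 : Int)) ++ [last])
      = pref ++ (List.range k).map
            (fun t => List.replicate (m - (a + t)) (0 : Int) ++ List.replicate (a + t) 2)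
          ++ List.replicate (m - 1 - (a + k)) (List.replicate m 0) ++ [last] := by
  intro k
  induction k with
  | zero =>
      intro a hm pref last hp
      rw [show (a : Int) + ((0:Nat):Int) = (a : Int) by simp, PySem.List.pyRange_one_eq_nil le_rfl]
      simp
  | succ k ih =>
      intro a hm pref last hp
      rw [PySem.List.pyRange_one_cons (by omega : (a:Int) < (a:Int) + ((k+1:Nat):Int))]
      simp only [List.foldl_cons]
      -- the step at row a
      have hg : ((a:Int)).toNat < (pref ++ List.replicate (m - 1 - a) (List.replicate m (0:Int)) ++ [last]).length := by
        simp [hp]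
      rw [row_loop (PySem.List.pyRange (-((a:Nat):Int)) 0 1) ((a:Nat):Int) (by omega)
            (fun row j => PySem.List.pySetD row j 2) [] _ hg]
      have hrep : List.replicate (m - 1 - a) (List.replicate m (0:Int))
          = List.replicate m (0:Int) :: List.replicate (m - 1 - (a+1)) (List.replicate m (0:Int)) := by
        rw [show m - 1 - a = (m - 1 - (a+1)) + 1 by omega, List.replicate_succ]
      have hget : (pref ++ List.replicate (m - 1 - a) (List.replicate m (0:Int)) ++ [last]).getD ((a:Int)).toNat []
          = List.replicate m (0:Int) := by
        rw [List.append_assoc, show ((a:Int)).toNat = pref.length by simp [hp], getD_append_length, hrep]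
        simp
      rw [hget, fill_neg _ _ _ (by simp; omega)]
      rw [List.length_replicate, List.take_replicate, show min (m - a) m = m - a by omega]
      -- write the set as an append
      rw [List.append_assoc, show ((a:Int)).toNat = pref.length by simp [hp], set_append_length, hrep]
      rw [show ((List.replicate m (0:Int) :: List.replicate (m-1-(a+1)) (List.replicate m (0:Int))) ++ [last]).set 0
              (List.replicate (m - a) (0:Int) ++ List.replicate a 2)
            = ((List.replicate (m - a) (0:Int) ++ List.replicate a 2)
              :: List.replicate (m-1-(a+1)) (List.replicate m (0:Int))) ++ [last] from rfl]
      rw [show (a:Int) + ((k+1:Nat):Int) = ((a+1:Nat):Int) + ((k:Nat):Int) by push_cast; ring,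
          show (a:Int) + 1 = ((a+1:Nat):Int) by push_cast; ring]
      rw [show pref ++ (((List.replicate (m - a) (0:Int) ++ List.replicate a 2)
              :: List.replicate (m-1-(a+1)) (List.replicate m (0:Int))) ++ [last])
            = (pref ++ [List.replicate (m - a) (0:Int) ++ List.replicate a 2])
              ++ List.replicate (m-1-(a+1)) (List.replicate m (0:Int)) ++ [last] by simp]
      rw [ih (a+1) (by omega) _ last (by simp [hp])]
      -- reassemble the mapped range
      rw [List.range_succ_eq_map]
      simp only [List.map_cons, List.map_map, Nat.add_zero, List.cons_append, List.append_assoc,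
        List.nil_append]
      congr 1
      congr 1
      congr 1
      · exact List.map_congr_left (fun t _ => by
          simp only [Function.comp_apply]
          rw [show a + 1 + t = a + Nat.succ t by omega])
      · congr 2
        omega

theorem join_empty_singletons (cs : List Char) :
    PySem.Str.join "" (cs.map (fun c => String.ofList [c])) = String.ofList cs := by
  apply String.toList_inj.mp
  rw [PySem.Str.toList_join]
  rw [List.map_map,
      show (String.toList ∘ fun c => String.ofList [c]) = (fun c => [c]) from funext (fun c => String.toList_ofList),
      show ("" : String).toList = [] from rfl, PySem.Chars.join_nil_singletons, String.toList_ofList]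

theorem strMul_single (c : Char) (k : Int) :
    pyStrMulChars [c] k = List.replicate k.toNat c := by
  simp [pyStrMulChars, List.flatten_replicate_singleton]

theorem rowMid_str (m t : Nat) (h : t ≤ m) :
    PySem.Str.join "" ((List.replicate (m - t) (0:Int) ++ List.replicate t 2).map (fun x => PySem.Int.toStr (x + 1)))
      = String.ofList (pyStrMulChars ['1'] ((m : Int) - (t : Int)) ++ pyStrMulChars ['3'] (t : Int)) := by
  rw [strMul_single, strMul_single, show ((m : Int) - (t : Int)).toNat = m - t by omega,
      show ((t : Int)).toNat = t by omega]
  rw [List.map_append, List.map_replicate, List.map_replicate]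
  rw [show PySem.Int.toStr ((0:Int) + 1) = String.ofList ['1'] from rfl,
      show PySem.Int.toStr ((2:Int) + 1) = String.ofList ['3'] from rfl]
  rw [show List.replicate (m - t) (String.ofList ['1']) = (List.replicate (m - t) '1').map (fun c => String.ofList [c]) by rw [List.map_replicate],
      show List.replicate t (String.ofList ['3']) = (List.replicate t '3').map (fun c => String.ofList [c]) by rw [List.map_replicate],
      ← List.map_append, join_empty_singletons]

theorem rowLast_str (p : Nat) :
    PySem.Str.join "" (((1:Int) :: List.replicate p 3).map (fun x => PySem.Int.toStr (x + 1)))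
      = String.ofList ('2' :: pyStrMulChars ['4'] (p : Int)) := by
  rw [strMul_single, show ((p : Int)).toNat = p by omega]
  rw [List.map_cons, List.map_replicate]
  rw [show PySem.Int.toStr ((1:Int) + 1) = String.ofList ['2'] from rfl,
      show PySem.Int.toStr ((3:Int) + 1) = String.ofList ['4'] from rfl]
  rw [show String.ofList ['2'] :: List.replicate p (String.ofList ['4']) = ('2' :: List.replicate p '4').map (fun c => String.ofList [c]) by simp [List.map_replicate],
      join_empty_singletons]

-- the fully evaluated grid of port A, for n = m ≥ 1
theorem solve_nat (m : Nat) (hm : 1 ≤ m) :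
    solve (m : Int)
      = ((List.range (m - 1)).map
            (fun t => List.replicate (m - t) (0:Int) ++ List.replicate t 2)
          ++ [(1:Int) :: List.replicate (m - 1) 3]).map
          (fun (a : List Int) => PySem.Str.join "" (a.map (fun x => PySem.Int.toStr (x + 1)))) := by
  unfold solve
  rw [pyRange_zero_eq_map_range]
  simp only [Int.toNat_natCast, List.map_const', List.length_map, List.length_range]
  rw [show List.replicate m (List.replicate m (0:Int))
        = List.replicate (m-1) (List.replicate m 0) ++ [List.replicate m 0] from by
      rw [← List.replicate_succ']; congr 1; omega]
  rw [PySem.List.pyGetD_neg_one_append_singleton]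
  rw [PySem.List.pySetD_of_nonneg _ _ (by omega : (0:Int) ≤ 0)]
  rw [show (List.replicate m (0:Int)).set ((0:Int)).toNat 1 = (1:Int) :: List.replicate (m-1) 0 from by
      rw [show m = (m-1)+1 by omega]; rfl]
  rw [pySetD_last]
  rw [lastrow_loop (PySem.List.pyRange 1 (m:Int) 1) (fun row j => PySem.List.pySetD row j 3) []]
  have hfill : (PySem.List.pyRange 1 (m:Int) 1).foldl (fun r j => PySem.List.pySetD r j (3:Int))
      ((1:Int) :: List.replicate (m-1) 0) = (1:Int) :: List.replicate (m-1) 3 := by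
    rw [show ((m:Int)) = (1:Int) + ((m-1:Nat):Int) by omega]
    rw [fill_pos 3 (m-1) 1 (by omega) _ (by simp; omega)]
    simp [List.drop_eq_nil_of_le]
  rw [hfill]
  by_cases hm2 : m = 1
  · subst hm2
    rw [PySem.List.pyRange_one_eq_nil (by omega)]
    simp
  · have hm2' : 2 ≤ m := by omega
    rw [show List.replicate (m-1) (List.replicate m (0:Int)) ++ [(1:Int) :: List.replicate (m-1) 3]
          = [List.replicate m (0:Int)] ++ List.replicate (m-1-1) (List.replicate m 0)
            ++ [(1:Int) :: List.replicate (m-1) 3] from by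
        rw [show m-1 = (m-1-1)+1 by omega, List.replicate_succ]; simp]
    have HO := outer_loop m (m-2) 1 (by omega) [List.replicate m (0:Int)]
        ((1:Int) :: List.replicate (m-1) 3) (by simp)
    simp only [Nat.cast_one] at HO
    rw [show ((m:Int) - 1) = (1:Int) + ((m-2:Nat):Int) by omega]
    rw [HO]
    congr 1
    rw [show m - 1 = (m-2)+1 by omega, List.range_succ_eq_map]
    simp only [List.map_cons, List.map_map, Nat.sub_zero, List.cons_append,
      List.nil_append, List.append_assoc]
    congr 1
    · simp
    congr 1
    · refine List.map_congr_left (fun t ht => ?_)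
      simp only [Function.comp_apply]
      rw [show 1 + t = t + 1 by omega]
    · rw [show m - 2 + 1 - (1 + (m-2)) = 0 by omega]
      simp

theorem solve_alt_nat (m : Nat) (hm : 1 ≤ m) :
    solve_alt (m : Int)
      = (List.range (m - 1)).map
            (fun (t : Nat) => String.ofList (pyStrMulChars ['1'] ((m:Int) - (t:Int)) ++ pyStrMulChars ['3'] (t:Int)))
          ++ [String.ofList ('2' :: pyStrMulChars ['4'] ((m:Int) - 1))] := by
  unfold solve_alt
  rw [show ((m:Int) - 1) = ((m-1:Nat):Int) by omega, pyRange_zero_eq_map_range]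
  simp only [Int.toNat_natCast, List.map_map]
  rfl

-- ===== VERDICT (by name: the statement is the Claim_ definition above) =====
theorem solve_spec : Claim_equal_solve := by
  intro n _ hpre
  unfold Spec_solve
  have hm1 : 1 ≤ n.toNat := by unfold Pre_solve at hpre; omega
  have hn : ((n.toNat : Nat) : Int) = n := Int.toNat_of_nonneg (by unfold Pre_solve at hpre; omega)
  rw [← hn, solve_nat _ hm1, solve_alt_nat _ hm1]
  rw [List.map_append, List.map_map]
  congr 1
  · refine List.map_congr_left (fun t ht => ?_)
    have htm : t ≤ n.toNat := by
      have := List.mem_range.mp ht; omega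
    simp only [Function.comp_apply]
    exact rowMid_str _ _ htm
  · rw [List.map_cons, List.map_nil, rowLast_str,
        show ((n.toNat - 1 : Nat) : Int) = ((n.toNat : Nat) : Int) - 1 by omega]
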